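-- pv_equiv track=rewrite | github.com/jqxcode/virtual-office | scripts/build-bap-adoption-summary.py | build_pr_reply
-- ===== SOURCE A (Python) =====
-- from collections import Counter, defaultdict
-- from typing import Dict, List, Optional, Tuple
--
-- def _area_group(area_path: str) -> str:
--     """Extract meaningful group from full area path."""
--     parts = area_path.split("\\")
--     # Skip MSTeams\Calling Meeting Devices (CMD)\Meetings\ prefix
--     if len(parts) >= 4 and "Meeting" in parts[2]:
--         return parts[3] if len(parts) > 3 else parts[-1]
--     if len(parts) >= 3:
--         return parts[-1]
--     return area_path
--
-- def _esc(text: str) -> str: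
--     """HTML-escape for Teams message."""
--     return (text.replace("&", "&amp;").replace("<", "&lt;")
--             .replace(">", "&gt;").replace('"', "&quot;"))
--
-- def build_pr_reply(
--     pr_map: Dict[int, List[str]], items_by_id: Dict[int, dict], token: str
-- ) -> str:
--     """Build thread reply HTML with PR details grouped by area path."""
--     if not pr_map:
--         return "<p>No fix PRs linked to queried bugs.</p>"
--
--     # Group by area path
--     area_groups: Dict[str, List[dict]] = defaultdict(list)
--     for bug_id, urls in pr_map.items():
--         item = items_by_id.get(bug_id, {})
--         area = _area_group(item.get("area_path", "Other"))
--         for url in urls: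
--             parts = url.split("/")
--             pr_id = parts[-1] if len(parts) >= 3 else "?"
--             area_groups[area].append({
--                 "pr_id": pr_id,
--                 "bug_id": bug_id,
--                 "bug_title": item.get("title", "")[:60],
--             })
--
--     html_parts = ["<h3>Fix PRs by Area Path</h3>"]
--     for area in sorted(area_groups.keys()):
--         prs = area_groups[area]
--         html_parts.append(f"<b>{_esc(area)}</b> ({len(prs)} PRs)")
--         html_parts.append(
--             '<table border="1" cellpadding="4" cellspacing="0" '
--             'style="border-collapse:collapse;width:100%;font-size:12px;margin-bottom:8px;">'
--             '<tr style="background-color:#1a1a2e;color:white;">'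
--             '<th style="padding:4px;border:1px solid #ddd;">PR</th>'
--             '<th style="padding:4px;border:1px solid #ddd;">Bug</th>'
--             '<th style="padding:4px;border:1px solid #ddd;">Title</th></tr>'
--         )
--         for pr in prs:
--             bug_url = f"https://domoreexp.visualstudio.com/MSTeams/_workitems/edit/{pr['bug_id']}"
--             html_parts.append(
--                 f'<tr>'
--                 f'<td style="padding:4px;border:1px solid #ddd;">#{pr["pr_id"]}</td>'
--                 f'<td style="padding:4px;border:1px solid #ddd;"><a href="{bug_url}">{pr["bug_id"]}</a></td>'
--                 f'<td style="padding:4px;border:1px solid #ddd;">{_esc(pr["bug_title"])}</td>'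
--                 f'</tr>'
--             )
--         html_parts.append("</table>")
--
--     return "\n".join(html_parts)
-- ===== SOURCE B (Python) =====
-- # B: no dict-of-lists grouping — one flat annotated record list, then sorted unique areas with a filter per area.
--
-- def _area_group(area_path: str) -> str:
--     parts = area_path.split("\\")
--     if len(parts) >= 4 and "Meeting" in parts[2]:
--         return parts[3] if len(parts) > 3 else parts[-1]
--     if len(parts) >= 3:
--         return parts[-1]
--     return area_path
--
-- def _esc(text: str) -> str:
--     return (text.replace("&", "&amp;").replace("<", "&lt;")
--             .replace(">", "&gt;").replace('"', "&quot;"))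
--
-- _TABLE_HEAD = (
--     '<table border="1" cellpadding="4" cellspacing="0" '
--     'style="border-collapse:collapse;width:100%;font-size:12px;margin-bottom:8px;">'
--     '<tr style="background-color:#1a1a2e;color:white;">'
--     '<th style="padding:4px;border:1px solid #ddd;">PR</th>'
--     '<th style="padding:4px;border:1px solid #ddd;">Bug</th>'
--     '<th style="padding:4px;border:1px solid #ddd;">Title</th></tr>'
-- )
--
-- def _annot(items_by_id, bug_id, url):
--     item = items_by_id.get(bug_id, {})
--     area = _area_group(item.get("area_path", "Other"))
--     parts = url.split("/")
--     pr_id = parts[-1] if len(parts) >= 3 else "?"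
--     return (area, pr_id, bug_id, item.get("title", "")[:60])
--
-- def build_pr_reply(pr_map, items_by_id, token):
--     if not pr_map:
--         return "<p>No fix PRs linked to queried bugs.</p>"
--     records = [_annot(items_by_id, bug_id, url)
--                for bug_id, urls in pr_map.items() for url in urls]
--     out = ["<h3>Fix PRs by Area Path</h3>"]
--     for area in sorted({r[0] for r in records}):
--         rows = [r for r in records if r[0] == area]
--         out.append(f"<b>{_esc(area)}</b> ({len(rows)} PRs)")
--         out.append(_TABLE_HEAD)
--         for _, pr_id, bug_id, title in rows:
--             bug_url = f"https://domoreexp.visualstudio.com/MSTeams/_workitems/edit/{bug_id}"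
--             out.append(
--                 f'<tr>'
--                 f'<td style="padding:4px;border:1px solid #ddd;">#{pr_id}</td>'
--                 f'<td style="padding:4px;border:1px solid #ddd;"><a href="{bug_url}">{bug_id}</a></td>'
--                 f'<td style="padding:4px;border:1px solid #ddd;">{_esc(title)}</td>'
--                 f'</tr>'
--             )
--         out.append("</table>")
--     return "\n".join(out)
-- ===== Notes on version B (the rewrite author's own statement) =====
-- stated objective: alternative
-- what changed: B replaces A's defaultdict-of-lists grouping with one flat pass producing annotated (area, pr_id, bug_id, title) records, then iterates the sorted set of areas and selects each group's rows by a filter over the flat list; no grouping dict is built.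
import Mathlib
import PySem

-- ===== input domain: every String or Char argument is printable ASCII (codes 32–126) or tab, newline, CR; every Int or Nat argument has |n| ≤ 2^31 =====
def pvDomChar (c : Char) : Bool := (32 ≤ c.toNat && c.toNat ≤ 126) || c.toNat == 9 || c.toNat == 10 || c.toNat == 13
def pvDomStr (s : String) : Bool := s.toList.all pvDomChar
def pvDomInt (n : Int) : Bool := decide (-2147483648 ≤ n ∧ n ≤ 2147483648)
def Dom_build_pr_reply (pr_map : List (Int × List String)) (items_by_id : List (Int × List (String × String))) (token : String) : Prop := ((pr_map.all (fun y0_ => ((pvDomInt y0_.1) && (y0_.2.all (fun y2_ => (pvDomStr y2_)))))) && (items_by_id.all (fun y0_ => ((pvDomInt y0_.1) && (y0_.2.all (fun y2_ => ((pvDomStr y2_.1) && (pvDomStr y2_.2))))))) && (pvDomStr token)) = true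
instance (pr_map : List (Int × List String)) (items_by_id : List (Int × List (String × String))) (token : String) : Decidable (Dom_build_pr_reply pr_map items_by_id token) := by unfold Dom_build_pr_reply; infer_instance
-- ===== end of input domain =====

-- B replaces A's dict-of-lists grouping by one flat annotated record list plus a filter per
-- sorted distinct area (a different decomposition of the same task; return value proved equal).

-- ===== PORT A =====
-- shared module helpers (_area_group, _esc and the literal HTML fragments both Pythons contain)

-- _area_group(area_path)
def pvAreaGroup (area_path : String) : String :=
  let parts := (PySem.Chars.splitOn area_path.toList ['\\']).map (fun cs => String.ofList cs)
  if 4 ≤ parts.length ∧ PySem.Str.isIn "Meeting" (parts.getD 2 "") then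
    -- here len(parts) > 3 always holds, so the Python returns parts[3]
    parts.getD 3 ""
  else if 3 ≤ parts.length then PySem.List.pyGetD parts (-1) ""
  else area_path

-- _esc(text)
def pvEsc (text : String) : String :=
  PySem.Str.replace (PySem.Str.replace (PySem.Str.replace (PySem.Str.replace text "&" "&amp;") "<" "&lt;") ">" "&gt;") "\"" "&quot;"

-- pr_id from one url: parts = url.split("/"); parts[-1] if len(parts) >= 3 else "?"
def pvPrId (url : String) : String :=
  let parts := (PySem.Chars.splitOn url.toList ['/']).map (fun cs => String.ofList cs)
  if 3 ≤ parts.length then PySem.List.pyGetD parts (-1) "" else "?"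

-- items_by_id.get(bug_id, {})
def pvItem (items_by_id : List (Int × List (String × String))) (bug_id : Int) : List (String × String) :=
  (PySem.Dict.mk items_by_id).getD bug_id []

-- item.get("title", "")[:60]
def pvTitle (item : List (String × String)) : String :=
  PySem.Str.slice ((PySem.Dict.mk item).getD "title" "") none (some 60)

-- f"<b>{_esc(area)}</b> ({len(prs)} PRs)"
def pvAreaHeader (area : String) (n : Nat) : String :=
  "<b>" ++ pvEsc area ++ "</b> (" ++ PySem.Int.toStr (n : Int) ++ " PRs)"

def pvTableHead : String :=
  "<table border=\"1\" cellpadding=\"4\" cellspacing=\"0\" style=\"border-collapse:collapse;width:100%;font-size:12px;margin-bottom:8px;\"><tr style=\"background-color:#1a1a2e;color:white;\"><th style=\"padding:4px;border:1px solid #ddd;\">PR</th><th style=\"padding:4px;border:1px solid #ddd;\">Bug</th><th style=\"padding:4px;border:1px solid #ddd;\">Title</th></tr>"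

-- one <tr> row from (pr_id, bug_id, bug_title)
def pvRowHtml (pr : String × Int × String) : String :=
  "<tr><td style=\"padding:4px;border:1px solid #ddd;\">#" ++ pr.1 ++
  "</td><td style=\"padding:4px;border:1px solid #ddd;\"><a href=\"https://domoreexp.visualstudio.com/MSTeams/_workitems/edit/" ++
  PySem.Int.toStr pr.2.1 ++ "\">" ++ PySem.Int.toStr pr.2.1 ++
  "</a></td><td style=\"padding:4px;border:1px solid #ddd;\">" ++ pvEsc pr.2.2 ++ "</td></tr>"

def build_pr_reply (pr_map : List (Int × List String)) (items_by_id : List (Int × List (String × String))) (token : String) : String :=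
  if pr_map = [] then "<p>No fix PRs linked to queried bugs.</p>" else
  -- area_groups: defaultdict(list), filled by the nested loop
  let area_groups : PySem.Dict String (List (String × Int × String)) :=
    pr_map.foldl (fun d e =>
      let item := pvItem items_by_id e.1
      let area := pvAreaGroup ((PySem.Dict.mk item).getD "area_path" "Other")
      e.2.foldl (fun d url =>
        d.modify area [] (fun l => l ++ [(pvPrId url, e.1, pvTitle item)])) d)
      PySem.Dict.empty
  let html_parts :=
    (PySem.List.sorted area_groups.keys (fun a => a) false).foldl (fun acc area =>
      let prs := area_groups.getD area []
      let acc := acc ++ [pvAreaHeader area prs.length]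
      let acc := acc ++ [pvTableHead]
      let acc := prs.foldl (fun acc pr => acc ++ [pvRowHtml pr]) acc
      acc ++ ["</table>"])
      ["<h3>Fix PRs by Area Path</h3>"]
  PySem.Str.join "\n" html_parts

-- ===== PORT B =====
-- _annot(items_by_id, bug_id, url) -> (area, pr_id, bug_id, title)
def pvAnnot (items_by_id : List (Int × List (String × String))) (bug_id : Int) (url : String) : String × String × Int × String :=
  let item := pvItem items_by_id bug_id
  (pvAreaGroup ((PySem.Dict.mk item).getD "area_path" "Other"), pvPrId url, bug_id, pvTitle item)

def build_pr_reply_alt (pr_map : List (Int × List String)) (items_by_id : List (Int × List (String × String))) (token : String) : String :=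
  if pr_map = [] then "<p>No fix PRs linked to queried bugs.</p>" else
  let records := pr_map.flatMap (fun e => e.2.map (fun url => pvAnnot items_by_id e.1 url))
  let areas := PySem.List.sorted (PySem.Set.ofList (records.map (fun r => r.1))) (fun a => a) false
  PySem.Str.join "\n" ("<h3>Fix PRs by Area Path</h3>" ::
    areas.flatMap (fun area =>
      let rows := records.filter (fun r => r.1 == area)
      pvAreaHeader area rows.length :: pvTableHead ::
        (rows.map (fun r => pvRowHtml r.2) ++ ["</table>"])))

-- ===== PRECONDITION & SPEC =====
def Spec_build_pr_reply (pr_map : List (Int × List String)) (items_by_id : List (Int × List (String × String))) (token : String) (out : String) : Prop := out = build_pr_reply_alt pr_map items_by_id token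
instance (pr_map : List (Int × List String)) (items_by_id : List (Int × List (String × String))) (token : String) (out : String) : Decidable (Spec_build_pr_reply pr_map items_by_id token out) := by unfold Spec_build_pr_reply; infer_instance

-- ===== CLAIM (what is proved, stated in full; the proofs are below) =====
def Claim_equal_build_pr_reply : Prop := ∀ (pr_map : List (Int × List String)) (items_by_id : List (Int × List (String × String))) (token : String), Dom_build_pr_reply pr_map items_by_id token → Spec_build_pr_reply pr_map items_by_id token (build_pr_reply pr_map items_by_id token)

-- ===== LEMMAS AND PROOFS =====


-- proof-local abbreviations: A's grouping dict and B's flat record list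
def pvDictA (ib : List (Int × List (String × String))) (pm : List (Int × List String)) :
    PySem.Dict String (List (String × Int × String)) :=
  pm.foldl (fun d e =>
    e.2.foldl (fun d url =>
      d.modify (pvAreaGroup ((PySem.Dict.mk (pvItem ib e.1)).getD "area_path" "Other")) []
        (fun l => l ++ [(pvPrId url, e.1, pvTitle (pvItem ib e.1))])) d)
    PySem.Dict.empty

def pvRecs (ib : List (Int × List (String × String))) (pm : List (Int × List String)) :
    List (String × String × Int × String) :=
  pm.flatMap (fun e => e.2.map (fun url => pvAnnot ib e.1 url))

theorem pvDictA_eq (ib : List (Int × List (String × String))) (pm : List (Int × List String)) :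
    pvDictA ib pm
      = (pvRecs ib pm).foldl (fun d p => d.modify p.1 [] (fun l => l ++ [p.2])) PySem.Dict.empty := by
  unfold pvDictA pvRecs
  rw [List.foldl_flatMap]
  congr 1
  funext d e
  rw [List.foldl_map]
  simp only [pvAnnot]

theorem pvRowsA_eq (ib : List (Int × List (String × String))) (pm : List (Int × List String)) (a : String) :
    (pvDictA ib pm).getD a []
      = ((pvRecs ib pm).filter (fun r => r.1 == a)).map (fun r => r.2) := by
  rw [pvDictA_eq, PySem.Dict.getD_foldl_modify_append]
  simp [PySem.Dict.getD_empty]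

theorem pvKeysA_eq (ib : List (Int × List (String × String))) (pm : List (Int × List String)) :
    (pvDictA ib pm).keys = PySem.Set.ofList ((pvRecs ib pm).map (fun r => r.1)) := by
  rw [pvDictA_eq, PySem.Dict.keys_foldl_modify_key (pvRecs ib pm) (fun p => p.1) [] (fun _ p l => l ++ [p.2]) PySem.Dict.empty]
  simp [PySem.Dict.keys_empty, PySem.Set.update_nil_left]

theorem pvA_render (pm : List (Int × List String)) (ib : List (Int × List (String × String)))
    (tok : String) (h : ¬ pm = []) :
    build_pr_reply pm ib tok
      = PySem.Str.join "\n" ("<h3>Fix PRs by Area Path</h3>" ::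
          (PySem.List.sorted (pvDictA ib pm).keys (fun a => a) false).flatMap (fun area =>
            pvAreaHeader area ((pvDictA ib pm).getD area []).length :: pvTableHead ::
              (((pvDictA ib pm).getD area []).map pvRowHtml ++ ["</table>"]))) := by
  unfold build_pr_reply
  rw [if_neg h]
  simp only [PySem.List.foldl_append_singleton_eq_map, List.append_assoc]
  rw [PySem.List.foldl_append_eq_flatMap]
  simp only [List.cons_append, List.nil_append, pvDictA]

theorem pvB_render (pm : List (Int × List String)) (ib : List (Int × List (String × String)))
    (tok : String) (h : ¬ pm = []) :
    build_pr_reply_alt pm ib tok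
      = PySem.Str.join "\n" ("<h3>Fix PRs by Area Path</h3>" ::
          (PySem.List.sorted (PySem.Set.ofList ((pvRecs ib pm).map (fun r => r.1))) (fun a => a) false).flatMap (fun area =>
            pvAreaHeader area ((pvRecs ib pm).filter (fun r => r.1 == area)).length :: pvTableHead ::
              (((pvRecs ib pm).filter (fun r => r.1 == area)).map (fun r => pvRowHtml r.2) ++ ["</table>"]))) := by
  unfold build_pr_reply_alt pvRecs
  rw [if_neg h]

-- ===== VERDICT (by name: the statement is the Claim_ definition above) =====
theorem build_pr_reply_spec : Claim_equal_build_pr_reply := by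
  intro pm ib tok _
  unfold Spec_build_pr_reply
  by_cases h : pm = []
  · simp [build_pr_reply, build_pr_reply_alt, h]
  · rw [pvA_render pm ib tok h, pvB_render pm ib tok h, pvKeysA_eq]
    have hfun :
        (fun area => pvAreaHeader area ((pvDictA ib pm).getD area []).length :: pvTableHead ::
            (((pvDictA ib pm).getD area []).map pvRowHtml ++ ["</table>"]))
          = (fun area => pvAreaHeader area ((pvRecs ib pm).filter (fun r => r.1 == area)).length :: pvTableHead ::
              (((pvRecs ib pm).filter (fun r => r.1 == area)).map (fun r => pvRowHtml r.2) ++ ["</table>"])) := by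
      funext area
      rw [pvRowsA_eq]
      simp [List.map_map, Function.comp]
    rw [hfun]
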